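-- pv_equiv track=rewrite | github.com/RandyBrown12/four_gallon | four_gallon.py | pour_gallons
-- ===== SOURCE A (Python) =====
-- from typing import List
--
-- def pour_gallons(gallons : List[int], pouringTo: int):
--     """
--     Description
--     -----------
--     Given two gallons, we will "pour" or transfer 1 unit of water from one gallon to the
--     other gallon and check for every transfer if we have hit the maximum for the other gallon or if we
--     have nothing (0) to pour to the other gallon.
--
--     Arguments
--     ---------
--     gallons: List[int]
--         An array containing two gallons
--
--     pouringTo: int
--         The index of the array in gallons to where the gallon is being poured to
--
--     Return
--     ------
--     int[]:
--         Updated gallons once pouring is complete.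
--     """
--
--     # Perform a deep copy to not mess with the gallons parameter
--     new_gallons = gallons.copy()
--
--     # Check if pouringTo is an integer and go to while loop to perform "pouring".
--     if pouringTo == 0:
--
--         # Continue Pouring until gallon[0] has be filled or gallon[1] is empty.
--         while new_gallons[1] != 0 and new_gallons[0] != 3:
--
--             # Remove 1 unit from 5-gallon
--             new_gallons[1] -= 1
--
--             # Add 1 unit to 3-gallon
--             new_gallons[0] += 1
--
--     elif pouringTo == 1:
--
--         # Continue Pouring until gallon[1] has be filled or gallon[0] is empty.
--         while new_gallons[0] != 0 and new_gallons[1] != 5: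
--
--             # Add 1 unit to 5-gallon
--             new_gallons[1] += 1
--
--             # Remove 1 unit from 3-gallon
--             new_gallons[0] -= 1
--
--     # Return the array of the gallon that have been finished pouring.
--     return new_gallons
-- ===== SOURCE B (Python) =====
-- from typing import List
--
-- def pour_gallons(gallons: List[int], pouringTo: int):
--     """Pour in one step: the transferred amount is the smaller of what the
--     source holds and the room left in the destination (3- or 5-gallon)."""
--     new_gallons = gallons.copy()
--     if pouringTo == 0:
--         amount = min(new_gallons[1], 3 - new_gallons[0])
--         new_gallons[0] += amount
--         new_gallons[1] -= amount
--     elif pouringTo == 1: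
--         amount = min(new_gallons[0], 5 - new_gallons[1])
--         new_gallons[1] += amount
--         new_gallons[0] -= amount
--     return new_gallons
-- ===== Notes on version B (the rewrite author's own statement) =====
-- stated objective: simpler
-- what changed: Replaces the unit-by-unit while loop with a single arithmetic pour (amount = min(source, capacity - destination)); Pre_ restricts to the task's natural domain (two gallons holding 0..3 and 0..5 units), outside which A raises, loops forever, or drains past capacity by accident.
-- outside the precondition, e.g. on pour_gallons([4, 2], 0): A returns [6, 0], B returns [3, 3]; on pour_gallons([0], 1): A returns [0], B raises IndexError
import Mathlib
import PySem

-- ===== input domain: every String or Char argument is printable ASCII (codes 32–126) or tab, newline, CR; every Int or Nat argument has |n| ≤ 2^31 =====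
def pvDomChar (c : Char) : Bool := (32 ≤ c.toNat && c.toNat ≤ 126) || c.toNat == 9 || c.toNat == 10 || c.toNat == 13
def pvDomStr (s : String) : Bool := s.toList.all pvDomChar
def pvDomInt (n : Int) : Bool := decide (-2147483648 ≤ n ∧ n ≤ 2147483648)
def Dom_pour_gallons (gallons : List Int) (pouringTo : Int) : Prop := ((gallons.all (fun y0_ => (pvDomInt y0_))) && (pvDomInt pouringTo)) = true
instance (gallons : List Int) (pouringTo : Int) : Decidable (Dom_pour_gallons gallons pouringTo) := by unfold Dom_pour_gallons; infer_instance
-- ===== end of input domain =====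

-- B replaces A's unit-by-unit pouring loop with one arithmetic pour of min(source, capacity - destination) (simpler).


-- ===== PORT A =====
-- A's while loop (move 1 unit from src to dst until src == 0 or dst == cap), with a
-- fuel guard that only makes the recursion total: inside Pre_ the fuel chosen in
-- pour_gallons is at least the number of iterations the Python loop performs.
def pourLoopA (cap : Int) : Nat → Int → Int → Int × Int
  | 0, src, dst => (src, dst)
  | fuel + 1, src, dst =>
      if src ≠ 0 ∧ dst ≠ cap then pourLoopA cap fuel (src - 1) (dst + 1)
      else (src, dst)

def pour_gallons (gallons : List Int) (pouringTo : Int) : List Int :=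
  let new_gallons := gallons
  if pouringTo = 0 then
    match PySem.List.pyGet? new_gallons 0, PySem.List.pyGet? new_gallons 1 with
    | some g0, some g1 =>
        let p := pourLoopA 3 (g1.natAbs + (3 - g0).natAbs) g1 g0
        (new_gallons.set 1 p.1).set 0 p.2
    | _, _ => new_gallons  -- IndexError in Python (outside Pre_)
  else if pouringTo = 1 then
    match PySem.List.pyGet? new_gallons 0, PySem.List.pyGet? new_gallons 1 with
    | some g0, some g1 =>
        let p := pourLoopA 5 (g0.natAbs + (5 - g1).natAbs) g0 g1
        (new_gallons.set 0 p.1).set 1 p.2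
    | _, _ => new_gallons  -- IndexError in Python (outside Pre_)
  else new_gallons

-- ===== PORT B =====
def pour_gallons_alt (gallons : List Int) (pouringTo : Int) : List Int :=
  let new_gallons := gallons
  if pouringTo = 0 then
    match PySem.List.pyGet? new_gallons 1 with
    | none => new_gallons  -- IndexError in Python (outside Pre_)
    | some g1 =>
      match PySem.List.pyGet? new_gallons 0 with
      | none => new_gallons  -- IndexError in Python (outside Pre_)
      | some g0 =>
        let amount := min g1 (3 - g0)
        (new_gallons.set 0 (g0 + amount)).set 1 (g1 - amount)
  else if pouringTo = 1 then
    match PySem.List.pyGet? new_gallons 0 with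
    | none => new_gallons  -- IndexError in Python (outside Pre_)
    | some g0 =>
      match PySem.List.pyGet? new_gallons 1 with
      | none => new_gallons  -- IndexError in Python (outside Pre_)
      | some g1 =>
        let amount := min g0 (5 - g1)
        (new_gallons.set 1 (g1 + amount)).set 0 (g0 - amount)
  else new_gallons

-- ===== PRECONDITION & SPEC =====
-- Pre_ restricts to the task's natural domain when a pour happens: two gallons holding
-- 0..3 and 0..5 units.  Outside it A raises (lists shorter than 2), loops forever
-- (negative source with destination over capacity), or its unit loop accidentally drains
-- the source past the destination's capacity — B's one-step pour is the intended value there.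
def Pre_pour_gallons (gallons : List Int) (pouringTo : Int) : Prop :=
  (pouringTo = 0 ∨ pouringTo = 1) →
    2 ≤ gallons.length ∧
    0 ≤ gallons.getD 0 0 ∧ gallons.getD 0 0 ≤ 3 ∧
    0 ≤ gallons.getD 1 0 ∧ gallons.getD 1 0 ≤ 5
instance (gallons : List Int) (pouringTo : Int) : Decidable (Pre_pour_gallons gallons pouringTo) := by unfold Pre_pour_gallons; infer_instance

def pvWitness_pour_gallons : List Int × Int := ([1, 4], 0)

def Spec_pour_gallons (gallons : List Int) (pouringTo : Int) (out : List Int) : Prop := out = pour_gallons_alt gallons pouringTo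
instance (gallons : List Int) (pouringTo : Int) (out : List Int) : Decidable (Spec_pour_gallons gallons pouringTo out) := by unfold Spec_pour_gallons; infer_instance

-- ===== CLAIM =====
def Claim_equal_pour_gallons : Prop := ∀ (gallons : List Int) (pouringTo : Int), Dom_pour_gallons gallons pouringTo → Pre_pour_gallons gallons pouringTo → Spec_pour_gallons gallons pouringTo (pour_gallons gallons pouringTo)

-- ===== LEMMAS AND PROOFS =====

-- the loop empties the source first
lemma pourLoopA_src (cap : Int) (fuel : Nat) :
    ∀ (src dst : Int), 0 ≤ src → dst + src ≤ cap → src.toNat ≤ fuel →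
    pourLoopA cap fuel src dst = (0, dst + src) := by
  induction fuel with
  | zero =>
      intro src dst h0 _ hf
      have : src = 0 := by omega
      subst this; simp [pourLoopA]
  | succ n ih =>
      intro src dst h0 hside hf
      by_cases hs : src = 0
      · subst hs; simp [pourLoopA]
      · have hd : dst ≠ cap := by omega
        have heq : pourLoopA cap (n+1) src dst = pourLoopA cap n (src - 1) (dst + 1) := by
          simp [pourLoopA, hs, hd]
        rw [heq, ih (src - 1) (dst + 1) (by omega) (by omega) (by omega),
          show dst + 1 + (src - 1) = dst + src from by ring]

-- the loop fills the destination first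
lemma pourLoopA_dst (cap : Int) (fuel : Nat) :
    ∀ (src dst : Int), dst ≤ cap → cap - dst ≤ src → (cap - dst).toNat ≤ fuel →
    pourLoopA cap fuel src dst = (src - (cap - dst), cap) := by
  induction fuel with
  | zero =>
      intro src dst h0 _ hf
      have : dst = cap := by omega
      subst this; simp [pourLoopA]
  | succ n ih =>
      intro src dst h0 hside hf
      by_cases hd : dst = cap
      · subst hd; simp [pourLoopA]
      · have hs : src ≠ 0 := by omega
        have heq : pourLoopA cap (n+1) src dst = pourLoopA cap n (src - 1) (dst + 1) := by
          simp [pourLoopA, hs, hd]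
        rw [heq, ih (src - 1) (dst + 1) (by omega) (by omega) (by omega),
          show src - 1 - (cap - (dst + 1)) = src - (cap - dst) from by ring]

-- inside the natural domain the loop result is the closed-form pour
lemma pourLoopA_closed (cap s d : Int) (hs : 0 ≤ s) (hd : d ≤ cap) :
    pourLoopA cap (s.natAbs + (cap - d).natAbs) s d
      = (s - min s (cap - d), d + min s (cap - d)) := by
  by_cases h : s ≤ cap - d
  · rw [pourLoopA_src cap _ s d hs (by omega) (by omega)]
    rw [min_eq_left h]
    rw [show s - s = (0:Int) from by omega]
  · rw [pourLoopA_dst cap _ s d hd (by omega) (by omega)]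
    rw [min_eq_right (by omega : cap - d ≤ s)]
    rw [show d + (cap - d) = cap from by omega]

lemma getD_cons2 (a b : Int) (rest : List Int) :
    (a :: b :: rest).getD 0 0 = a ∧ (a :: b :: rest).getD 1 0 = b := by simp

-- ===== VERDICT =====
theorem pour_gallons_spec : Claim_equal_pour_gallons := by
  intro gallons pouringTo _ hpre
  unfold Spec_pour_gallons pour_gallons pour_gallons_alt
  by_cases h0 : pouringTo = 0
  · obtain ⟨hlen, hb0, hb1, hb2, hb3⟩ := hpre (Or.inl h0)
    obtain ⟨a, b, rest, rfl⟩ : ∃ a b rest, gallons = a :: b :: rest := by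
      match gallons, hlen with
      | a :: b :: rest, _ => exact ⟨a, b, rest, rfl⟩
    obtain ⟨ha, hb⟩ := getD_cons2 a b rest
    rw [ha] at hb0 hb1; rw [hb] at hb2 hb3
    simp only [h0, if_true]
    have hA : PySem.List.pyGet? (a :: b :: rest) (0 : Int) = some a :=
      PySem.List.pyGet?_zero_cons a (b :: rest)
    have hB : PySem.List.pyGet? (a :: b :: rest) (1 : Int) = some b := by
      rw [show (1:Int) = ((1:Nat):Int) from rfl, PySem.List.pyGet?_natCast]; rfl
    rw [hA, hB]
    simp only [pourLoopA_closed 3 b a hb2 hb1, List.set]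
  · by_cases h1 : pouringTo = 1
    · obtain ⟨hlen, hb0, hb1, hb2, hb3⟩ := hpre (Or.inr h1)
      obtain ⟨a, b, rest, rfl⟩ : ∃ a b rest, gallons = a :: b :: rest := by
        match gallons, hlen with
        | a :: b :: rest, _ => exact ⟨a, b, rest, rfl⟩
      obtain ⟨ha, hb⟩ := getD_cons2 a b rest
      rw [ha] at hb0 hb1; rw [hb] at hb2 hb3
      simp only [h1, if_neg (by norm_num : ¬(1:Int) = 0)]
      have hA : PySem.List.pyGet? (a :: b :: rest) (0 : Int) = some a :=
        PySem.List.pyGet?_zero_cons a (b :: rest)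
      have hB : PySem.List.pyGet? (a :: b :: rest) (1 : Int) = some b := by
        rw [show (1:Int) = ((1:Nat):Int) from rfl, PySem.List.pyGet?_natCast]; rfl
      rw [hA, hB]
      simp only [pourLoopA_closed 5 a b hb0 hb3, List.set]
    · simp [h0, h1]
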